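-- pv_equiv track=rewrite | github.com/Tay-Son/GH_CT | BOJ 12728.py | cus_pow
-- ===== SOURCE A (Python) =====
-- def cus_mult(cus_a, cus_b):
--     return [cus_a[0] * cus_b[0] + 5  * cus_a[1] * cus_b[1], cus_a[0] * cus_b[1] + cus_a[1] * cus_b[0]]
--
-- def cus_pow(cus_, num_):
--     cus_o = [1, 0]
--     while num_:
--         num_, is_ = divmod(num_, 2)
--         if is_:
--             cus_o = cus_mult(cus_o, cus_)
--         cus_ = cus_mult(cus_, cus_)
--     return cus_o
-- ===== SOURCE B (Python) =====
-- def cus_mult(cus_a, cus_b):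
--     return [cus_a[0] * cus_b[0] + 5  * cus_a[1] * cus_b[1], cus_a[0] * cus_b[1] + cus_a[1] * cus_b[0]]
--
-- def cus_pow(cus_, num_):
--     if num_ == 0:
--         return [1, 0]
--     half = cus_pow(cus_, num_ // 2)
--     res = cus_mult(half, half)
--     if num_ % 2:
--         res = cus_mult(res, cus_)
--     return res
-- ===== Notes on version B (the rewrite author's own statement) =====
-- stated objective: alternative
-- what changed: The iterative while-loop with an accumulator and repeated squaring of the base is replaced by top-down divide-and-conquer recursion: recurse on num_//2, square the half-result, and multiply by the base once if num_ is odd; cus_mult is unchanged.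
import Mathlib
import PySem

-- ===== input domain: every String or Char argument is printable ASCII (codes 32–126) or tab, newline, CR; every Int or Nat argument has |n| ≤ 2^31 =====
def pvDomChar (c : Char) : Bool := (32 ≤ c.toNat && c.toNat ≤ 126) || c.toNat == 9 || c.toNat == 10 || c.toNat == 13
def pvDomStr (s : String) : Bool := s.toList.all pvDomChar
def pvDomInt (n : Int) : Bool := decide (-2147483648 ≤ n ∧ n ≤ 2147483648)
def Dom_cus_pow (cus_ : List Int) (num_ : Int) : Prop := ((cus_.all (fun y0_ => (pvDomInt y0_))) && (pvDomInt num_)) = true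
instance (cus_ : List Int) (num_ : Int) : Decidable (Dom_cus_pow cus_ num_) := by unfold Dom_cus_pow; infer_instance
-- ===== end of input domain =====

-- B replaces A's iterative accumulator loop by top-down divide-and-conquer recursion on num_//2 (alternative decomposition, same cost).


-- ===== PORT A =====
-- cus_mult: list indexing cus_[0]/cus_[1]; Pre_ guarantees length ≥ 2 wherever it is reached,
-- so pyGetD with default 0 is exact there (Python raises IndexError outside Pre_).
def cusMult (a b : List Int) : List Int :=
  [PySem.List.pyGetD a 0 0 * PySem.List.pyGetD b 0 0 + 5 * PySem.List.pyGetD a 1 0 * PySem.List.pyGetD b 1 0,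
   PySem.List.pyGetD a 0 0 * PySem.List.pyGetD b 1 0 + PySem.List.pyGetD a 1 0 * PySem.List.pyGetD b 0 0]

-- the while-loop of A; the `num_ ≤ 0` guard totalizes it (Python loops forever for num_ < 0, outside Pre_)
def cusPowLoop (cus_ cus_o : List Int) (num_ : Int) : List Int :=
  if num_ ≤ 0 then cus_o
  else
    let q := PySem.Int.floordiv num_ 2
    let r := PySem.Int.mod num_ 2
    cusPowLoop (cusMult cus_ cus_) (if r ≠ 0 then cusMult cus_o cus_ else cus_o) q
termination_by num_.toNat
decreasing_by
  rw [PySem.Int.floordiv_eq_ediv_of_pos (by omega)]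
  omega

def cus_pow (cus_ : List Int) (num_ : Int) : List Int :=
  cusPowLoop cus_ [1, 0] num_

-- ===== PORT B =====
-- recursion totalized by the `num_ ≤ 0` guard (Python B recurses forever for num_ < 0, outside Pre_)
def cus_pow_alt (cus_ : List Int) (num_ : Int) : List Int :=
  if num_ ≤ 0 then [1, 0]
  else
    let half := cus_pow_alt cus_ (PySem.Int.floordiv num_ 2)
    let res := cusMult half half
    if PySem.Int.mod num_ 2 ≠ 0 then cusMult res cus_ else res
termination_by num_.toNat
decreasing_by
  rw [PySem.Int.floordiv_eq_ediv_of_pos (by omega)]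
  omega

-- ===== PRECONDITION & SPEC =====
-- Pre_ excludes exactly the inputs where A does not return: num_ < 0 (A's while-loop never terminates)
-- and num_ > 0 with fewer than two list elements (cus_mult raises IndexError).
def Pre_cus_pow (cus_ : List Int) (num_ : Int) : Prop :=
  0 ≤ num_ ∧ (num_ = 0 ∨ 2 ≤ cus_.length)
instance (cus_ : List Int) (num_ : Int) : Decidable (Pre_cus_pow cus_ num_) := by unfold Pre_cus_pow; infer_instance
def pvWitness_cus_pow : List Int × Int := ([1, 2], 5)

def Spec_cus_pow (cus_ : List Int) (num_ : Int) (out : List Int) : Prop := out = cus_pow_alt cus_ num_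
instance (cus_ : List Int) (num_ : Int) (out : List Int) : Decidable (Spec_cus_pow cus_ num_ out) := by unfold Spec_cus_pow; infer_instance

-- ===== CLAIM (what is proved, stated in full; the proofs are below) =====
def Claim_equal_cus_pow : Prop := ∀ (cus_ : List Int) (num_ : Int), Dom_cus_pow cus_ num_ → Pre_cus_pow cus_ num_ → Spec_cus_pow cus_ num_ (cus_pow cus_ num_)

-- ===== LEMMAS AND PROOFS =====

-- interpret a (length-≥-2) list as an element of ℤ[√5]
def pvToZ (l : List Int) : Zsqrtd 5 := ⟨PySem.List.pyGetD l 0 0, PySem.List.pyGetD l 1 0⟩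
def pvOfZ (z : Zsqrtd 5) : List Int := [z.re, z.im]

theorem pvToZ_pvOfZ (z : Zsqrtd 5) : pvToZ (pvOfZ z) = z := by
  simp [pvToZ, pvOfZ, PySem.List.pyGetD]

theorem cusMult_eq_pvOfZ (a b : List Int) : cusMult a b = pvOfZ (pvToZ a * pvToZ b) := by
  simp only [cusMult, pvOfZ, pvToZ, Zsqrtd.re_mul, Zsqrtd.im_mul]

theorem pvToZ_cusMult (a b : List Int) : pvToZ (cusMult a b) = pvToZ a * pvToZ b := by
  rw [cusMult_eq_pvOfZ, pvToZ_pvOfZ]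

theorem alt_eq_pow (cus_ : List Int) (num_ : Int) (h : 0 ≤ num_) :
    cus_pow_alt cus_ num_ = pvOfZ (pvToZ cus_ ^ num_.toNat) := by
  induction hn : num_.toNat using Nat.strong_induction_on generalizing num_ with
  | _ n ih =>
    by_cases h0 : num_ ≤ 0
    · have hz : num_ = 0 := le_antisymm h0 h
      subst hz
      rw [cus_pow_alt]
      simp at hn
      simp [← hn, pvOfZ]
    · have hpos : 0 < num_ := by omega
      have hq : PySem.Int.floordiv num_ 2 = num_ / 2 := PySem.Int.floordiv_eq_ediv_of_pos (by omega)
      have hr : PySem.Int.mod num_ 2 = num_ % 2 := PySem.Int.mod_eq_emod_of_pos (by omega)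
      have ihh := ih ((num_ / 2).toNat) (by omega) (num_ / 2) (by omega) rfl
      rw [cus_pow_alt, if_neg h0]
      simp only [hq, hr, ihh, cusMult_eq_pvOfZ, pvToZ_pvOfZ]
      by_cases hodd : num_ % 2 = 0
      · rw [if_neg (by simp [hodd])]
        congr 1
        have : n = 2 * (num_ / 2).toNat := by omega
        rw [this, two_mul, pow_add]
      · rw [if_pos (by simp [hodd])]
        congr 1
        have : n = 2 * (num_ / 2).toNat + 1 := by omega
        rw [this, pow_succ, two_mul, pow_add]

theorem loop_eq_pow (cus_ : List Int) (x y : Int) (num_ : Int) (h : 0 ≤ num_) :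
    cusPowLoop cus_ [x, y] num_ = pvOfZ (pvToZ [x, y] * pvToZ cus_ ^ num_.toNat) := by
  induction hn : num_.toNat using Nat.strong_induction_on generalizing cus_ x y num_ with
  | _ n ih =>
    by_cases h0 : num_ ≤ 0
    · have hz : num_ = 0 := le_antisymm h0 h
      subst hz
      rw [cusPowLoop, if_pos le_rfl]
      simp at hn
      simp [← hn, pvOfZ, pvToZ, PySem.List.pyGetD]
    · have hpos : 0 < num_ := by omega
      have hq : PySem.Int.floordiv num_ 2 = num_ / 2 := PySem.Int.floordiv_eq_ediv_of_pos (by omega)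
      have hr : PySem.Int.mod num_ 2 = num_ % 2 := PySem.Int.mod_eq_emod_of_pos (by omega)
      rw [cusPowLoop, if_neg h0]
      simp only [hq, hr]
      by_cases hodd : num_ % 2 = 0
      · rw [if_neg (by simp [hodd])]
        rw [ih ((num_ / 2).toNat) (by omega) _ x y (num_ / 2) (by omega) rfl]
        congr 1
        rw [pvToZ_cusMult]
        have : n = 2 * (num_ / 2).toNat := by omega
        rw [this, pow_mul, sq]
      · have hacc : cusMult [x, y] cus_ =
            [(pvToZ [x, y] * pvToZ cus_).re, (pvToZ [x, y] * pvToZ cus_).im] := cusMult_eq_pvOfZ _ _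
        rw [if_pos (by simp [hodd]), hacc,
            ih ((num_ / 2).toNat) (by omega) _ _ _ (num_ / 2) (by omega) rfl]
        congr 1
        rw [show pvToZ [(pvToZ [x, y] * pvToZ cus_).re, (pvToZ [x, y] * pvToZ cus_).im] =
              pvToZ [x, y] * pvToZ cus_ from pvToZ_pvOfZ _, pvToZ_cusMult]
        have : n = 2 * (num_ / 2).toNat + 1 := by omega
        rw [this, pow_succ, pow_mul, sq]
        ring

-- ===== VERDICT (by name: the statement is the Claim_ definition above) =====
theorem cus_pow_spec : Claim_equal_cus_pow := by
  intro cus_ num_ _ hpre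
  unfold Spec_cus_pow cus_pow
  rw [loop_eq_pow cus_ 1 0 num_ hpre.1, alt_eq_pow cus_ num_ hpre.1]
  congr 1
  rw [show pvToZ [1, 0] = (1 : Zsqrtd 5) from rfl, one_mul]
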